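-- pv_equiv track=rewrite | github.com/Airymon/aoc2019 | 16/aoc_16.py | apply_pattern
-- ===== SOURCE A (Python) =====
-- def apply_pattern(sequence, pos, start, pattern):
--     n = len(pattern)
--     startpos = pos - start
--     sum = 0
--     for i, digit in enumerate(sequence[startpos:]):
--         sum += digit * pattern[(i+startpos+1)//pos % n]
--     out_dig = abs(sum) % 10
--     return out_dig
-- ===== SOURCE B (Python) =====
-- def apply_pattern(sequence, pos, start, pattern):
--     # Block decomposition: the pattern multiplier is constant on runs of `pos`
--     # consecutive positions, so sum each run at once instead of element-wise.
--     n = len(pattern)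
--     startpos = pos - start
--     t = sequence[startpos:]
--     total = 0
--     i = 0
--     for _ in range(len(t)):  # at most len(t) blocks (each block has length >= 1)
--         if i >= len(t):
--             break
--         q, r = divmod(i + startpos + 1, pos)
--         blocklen = pos - r  # positions left in the current constant-multiplier run
--         mult = pattern[q % n]
--         if mult != 0:
--             total += mult * sum(t[i:i + blocklen])
--         i += blocklen
--     return abs(total) % 10
-- ===== Notes on version B (the rewrite author's own statement) =====
-- stated objective: alternative
-- what changed: B sums whole constant-multiplier blocks of length pos (one slice-sum and one pattern lookup per block, skipping zero-multiplier blocks) instead of A's per-element pattern lookup and multiply.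
-- outside the precondition, e.g. on apply_pattern([1, 2, 3], -1, 0, [1, 2]): A returns 3, B returns 0; on apply_pattern([7], -2, 0, [1, 2]): A returns 7, B returns 0
import Mathlib
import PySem

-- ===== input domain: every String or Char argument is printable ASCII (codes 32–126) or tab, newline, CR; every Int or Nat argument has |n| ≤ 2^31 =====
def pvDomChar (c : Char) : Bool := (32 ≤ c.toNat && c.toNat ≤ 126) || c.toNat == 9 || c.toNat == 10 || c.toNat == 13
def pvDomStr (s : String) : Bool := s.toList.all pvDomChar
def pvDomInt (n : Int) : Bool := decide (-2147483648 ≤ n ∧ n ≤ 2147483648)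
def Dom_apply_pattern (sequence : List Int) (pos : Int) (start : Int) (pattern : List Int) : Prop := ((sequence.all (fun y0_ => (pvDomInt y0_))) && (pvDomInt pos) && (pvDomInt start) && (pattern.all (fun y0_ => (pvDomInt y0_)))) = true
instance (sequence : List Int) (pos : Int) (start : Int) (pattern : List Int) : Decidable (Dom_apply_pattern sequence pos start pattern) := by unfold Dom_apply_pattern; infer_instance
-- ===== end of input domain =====

-- B sums each constant-multiplier block of length `pos` with one slice-sum and one
-- pattern lookup (skipping zero multipliers) instead of A's per-element lookup loop.

-- ===== PORT A =====
def apply_pattern (sequence : List Int) (pos : Int) (start : Int) (pattern : List Int) : Int :=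
  let n : Int := pattern.length
  let startpos : Int := pos - start
  let s : Int :=
    (PySem.List.enumerate (PySem.List.slice sequence (some startpos) none) 0).foldl
      (fun acc p =>
        acc + p.2 * PySem.List.pyGetD pattern
          (PySem.Int.mod (PySem.Int.floordiv (p.1 + startpos + 1) pos) n) 0) 0
  PySem.Int.mod |s| 10

-- ===== PORT B =====
-- the bounded block loop of Source B ('for _ in range(len(t))' with early break), fuel = len t
def altBlocks (t pattern : List Int) (startpos pos n : Int) : Nat → Int → Int → Int
  | 0, _, total => total
  | fuel + 1, i, total =>
    if i < (t.length : Int) then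
      let q : Int := PySem.Int.floordiv (i + startpos + 1) pos
      let r : Int := PySem.Int.mod (i + startpos + 1) pos
      let blocklen : Int := pos - r
      let mult : Int := PySem.List.pyGetD pattern (PySem.Int.mod q n) 0
      let total' : Int :=
        if mult ≠ 0 then total + mult * (PySem.List.slice t (some i) (some (i + blocklen))).sum
        else total
      altBlocks t pattern startpos pos n fuel (i + blocklen) total'
    else total

def apply_pattern_alt (sequence : List Int) (pos : Int) (start : Int) (pattern : List Int) : Int :=
  let n : Int := pattern.length
  let startpos : Int := pos - start
  let t := PySem.List.slice sequence (some startpos) none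
  PySem.Int.mod |altBlocks t pattern startpos pos n t.length 0 0| 10

-- ===== PRECONDITION & SPEC =====
-- Pre_ keeps the FFT's natural domain pos ≥ 1 with a nonempty pattern (pos = 0 or pattern = []
-- makes A raise ZeroDivisionError once the sliced tail is nonempty, and a nonpositive pattern
-- position is meaningless, so A's value for pos < 0 is accidental), plus every input whose
-- sliced tail sequence[pos-start:] is empty (both trivially return 0 there).
def Pre_apply_pattern (sequence : List Int) (pos : Int) (start : Int) (pattern : List Int) : Prop :=
  (1 ≤ pos ∧ pattern ≠ []) ∨ sequence = [] ∨ (sequence.length : Int) ≤ pos - start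
instance (sequence : List Int) (pos : Int) (start : Int) (pattern : List Int) : Decidable (Pre_apply_pattern sequence pos start pattern) := by unfold Pre_apply_pattern; infer_instance

def pvWitness_apply_pattern : List Int × Int × Int × List Int := ([1, 2, 3, 4], 2, 1, [0, 1, 0, -1])

def Spec_apply_pattern (sequence : List Int) (pos : Int) (start : Int) (pattern : List Int) (out : Int) : Prop := out = apply_pattern_alt sequence pos start pattern
instance (sequence : List Int) (pos : Int) (start : Int) (pattern : List Int) (out : Int) : Decidable (Spec_apply_pattern sequence pos start pattern out) := by unfold Spec_apply_pattern; infer_instance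

-- ===== CLAIM (what is proved, stated in full; the proofs are below) =====
def Claim_equal_apply_pattern : Prop := ∀ (sequence : List Int) (pos : Int) (start : Int) (pattern : List Int), Dom_apply_pattern sequence pos start pattern → Pre_apply_pattern sequence pos start pattern → Spec_apply_pattern sequence pos start pattern (apply_pattern sequence pos start pattern)

-- ===== LEMMAS AND PROOFS =====

-- the per-position multiplier both programs use
def pvMult (pattern : List Int) (startpos pos n j : Int) : Int :=
  PySem.List.pyGetD pattern (PySem.Int.mod (PySem.Int.floordiv (j + startpos + 1) pos) n) 0

-- the weighted sum Σ u[d] * f (i + d)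
def pvS (f : Int → Int) : List Int → Int → Int
  | [], _ => 0
  | x :: xs, i => x * f i + pvS f xs (i + 1)

theorem foldl_enumerate_eq_pvS (f : Int → Int) :
    ∀ (t : List Int) (i0 acc : Int),
      (PySem.List.enumerate t i0).foldl (fun acc p => acc + p.2 * f p.1) acc = acc + pvS f t i0 := by
  intro t
  induction t with
  | nil => intro i0 acc; simp [PySem.List.enumerate_nil, pvS]
  | cons x xs ih =>
    intro i0 acc
    rw [PySem.List.enumerate_cons]
    simp only [List.foldl_cons, ih, pvS]
    ring

theorem pvS_split (f : Int → Int) :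
    ∀ (k : Nat) (u : List Int) (i : Int), (∀ d : Nat, d < k → f (i + d) = f i) →
      pvS f u i = f i * (u.take k).sum + pvS f (u.drop k) (i + k) := by
  intro k
  induction k with
  | zero => intro u i _; simp
  | succ k ih =>
    intro u i h
    cases u with
    | nil => simp [pvS]
    | cons x xs =>
      have hsh : ∀ d : Nat, d < k → f (i + 1 + d) = f i := by
        intro d hd
        have := h (d + 1) (by omega)
        have he : i + ((d + 1 : Nat) : Int) = i + 1 + d := by push_cast; ring
        rwa [he] at this
      have hstep := ih xs (i + 1) (by
        intro d hd
        rw [hsh d hd]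
        by_cases hk : k = 0
        · omega
        · simpa using (hsh 0 (by omega)).symm)
      have hfi1 : f (i + 1) * (xs.take k).sum = f i * (xs.take k).sum := by
        by_cases hk : k = 0
        · simp [hk]
        · rw [show f (i + 1) = f i by simpa using hsh 0 (by omega)]
      simp only [pvS, hstep, hfi1, List.take_succ_cons, List.drop_succ_cons, List.sum_cons]
      have he : i + 1 + (k : Int) = i + ((k + 1 : Nat) : Int) := by push_cast; ring
      rw [he]; ring

-- the multiplier is constant across a block: same floor quotient
theorem floordiv_add_small (v pos d : Int) (hpos : 1 ≤ pos) (hd : 0 ≤ d)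
    (hlt : d < pos - PySem.Int.mod v pos) :
    PySem.Int.floordiv (v + d) pos = PySem.Int.floordiv v pos := by
  have hpe : ∀ w : Int, PySem.Int.floordiv w pos = w / pos := fun w =>
    PySem.Int.floordiv_eq_ediv_of_pos (by omega)
  rw [PySem.Int.mod_eq_emod_of_pos (by omega)] at hlt
  rw [hpe, hpe]
  have hvm : pos * (v / pos) + v % pos = v := Int.mul_ediv_add_emod v pos
  have hnn : 0 ≤ v % pos := Int.emod_nonneg v (by omega)
  have h1 : v + d = (v % pos + d) + pos * (v / pos) := by omega
  rw [h1, Int.add_mul_ediv_left _ _ (by omega : pos ≠ 0),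
    Int.ediv_eq_zero_of_lt (by omega) (by omega)]
  omega

theorem altBlocks_eq (t pattern : List Int) (startpos pos n : Int) (hpos : 1 ≤ pos) :
    ∀ (fuel : Nat) (i total : Int), 0 ≤ i → (t.length : Int) ≤ i + fuel →
      altBlocks t pattern startpos pos n fuel i total
        = total + pvS (pvMult pattern startpos pos n) (t.drop i.toNat) i := by
  intro fuel
  induction fuel with
  | zero =>
    intro i total hi hlen
    have : t.drop i.toNat = [] := List.drop_eq_nil_of_le (by omega)
    simp [altBlocks, this, pvS]
  | succ fuel ih =>
    intro i total hi hlen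
    rw [altBlocks]
    by_cases hlt : i < (t.length : Int)
    · simp only [if_pos hlt]
      set v : Int := i + startpos + 1 with hv
      set r : Int := PySem.Int.mod v pos with hr
      have hrb : 0 ≤ r ∧ r < pos := by
        rw [hr, PySem.Int.mod_eq_emod_of_pos (by omega)]
        exact ⟨Int.emod_nonneg v (by omega), Int.emod_lt_of_pos v (by omega)⟩
      set blocklen : Int := pos - r with hbl
      have hbl1 : 1 ≤ blocklen := by omega
      -- the slice is (t.drop i.toNat).take blocklen.toNat
      have hslice : PySem.List.slice t (some i) (some (i + blocklen))
          = (t.drop i.toNat).take ((i + blocklen).toNat - i.toNat) :=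
        PySem.List.slice_toNat t hi (by omega)
      have htk : (i + blocklen).toNat - i.toNat = blocklen.toNat := by omega
      -- multiplier constancy on the block
      have hconst : ∀ d : Nat, d < blocklen.toNat → pvMult pattern startpos pos n (i + d) = pvMult pattern startpos pos n i := by
        intro d hd
        unfold pvMult
        have hfd : PySem.Int.floordiv (i + d + startpos + 1) pos = PySem.Int.floordiv (i + startpos + 1) pos := by
          have he : i + d + startpos + 1 = v + d := by rw [hv]; ring
          rw [he]
          exact floordiv_add_small v pos d hpos (by positivity) (by omega)
        rw [hfd]
      have hsplit := pvS_split (pvMult pattern startpos pos n) blocklen.toNat (t.drop i.toNat) i hconst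
      have hdd : (t.drop i.toNat).drop blocklen.toNat = t.drop (i + blocklen).toNat := by
        rw [List.drop_drop]
        congr 1
        omega
      have hrec := ih (i + blocklen) (if PySem.List.pyGetD pattern (PySem.Int.mod (PySem.Int.floordiv v pos) n) 0 ≠ 0 then total + PySem.List.pyGetD pattern (PySem.Int.mod (PySem.Int.floordiv v pos) n) 0 * (PySem.List.slice t (some i) (some (i + blocklen))).sum else total) (by omega) (by omega)
      rw [hrec, hdd.symm]
      have hmi : pvMult pattern startpos pos n i = PySem.List.pyGetD pattern (PySem.Int.mod (PySem.Int.floordiv v pos) n) 0 := by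
        unfold pvMult; rw [hv]
      have hcast : i + (blocklen.toNat : Int) = i + blocklen := by omega
      rw [hsplit, hslice, htk, hcast]
      by_cases hz : PySem.List.pyGetD pattern (PySem.Int.mod (PySem.Int.floordiv v pos) n) 0 = 0
      · simp [hz, hmi]
      · simp only [if_pos hz, hmi]
        ring
    · simp only [if_neg hlt]
      have : t.drop i.toNat = [] := List.drop_eq_nil_of_le (by omega)
      simp [this, pvS]

-- ===== VERDICT (by name: the statement is the Claim_ definition above) =====
-- when the sliced tail is empty, both sides are trivially 0
theorem slice_from_empty (sequence : List Int) (a : Int)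
    (h : sequence = [] ∨ (sequence.length : Int) ≤ a) :
    PySem.List.slice sequence (some a) none = [] := by
  rcases h with h | h
  · subst h; rw [PySem.List.slice_some_none]; exact List.drop_nil
  · rw [PySem.List.slice_from sequence (by omega)]
    exact List.drop_eq_nil_of_le (by omega)

theorem apply_pattern_eq_of_pos (sequence : List Int) (pos start : Int) (pattern : List Int)
    (hpos : 1 ≤ pos) :
    apply_pattern sequence pos start pattern = apply_pattern_alt sequence pos start pattern := by
  have hA := foldl_enumerate_eq_pvS
    (fun j => PySem.List.pyGetD pattern
      (PySem.Int.mod (PySem.Int.floordiv (j + (pos - start) + 1) pos) (pattern.length : Int)) 0)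
    (PySem.List.slice sequence (some (pos - start)) none) 0 0
  have hB := altBlocks_eq (PySem.List.slice sequence (some (pos - start)) none) pattern
    (pos - start) pos ((pattern.length : Int)) hpos
    (PySem.List.slice sequence (some (pos - start)) none).length 0 0 le_rfl (by omega)
  simp only [Int.toNat_zero, List.drop_zero] at hB
  simp only [apply_pattern, apply_pattern_alt, hA, hB, zero_add]
  rfl

theorem apply_pattern_spec : Claim_equal_apply_pattern := by
  intro sequence pos start pattern _ hpre
  unfold Spec_apply_pattern
  rcases hpre with ⟨hpos, -⟩ | hempty
  · exact apply_pattern_eq_of_pos sequence pos start pattern hpos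
  · have ht := slice_from_empty sequence (pos - start) hempty
    simp only [apply_pattern, apply_pattern_alt, ht, PySem.List.enumerate_nil,
      List.length_nil, List.foldl_nil]
    rfl
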